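-- pv_equiv track=rewrite | github.com/MORouis/Problem-Solving | python/Text_Case_Converter.py | lower_to_upper
-- ===== SOURCE A (Python) =====
-- def is_minus(c):
--     return ord('a')<=ord(c)<=ord('z')
--
-- def lower_to_upper(text):
--     text_in_maj = ""
--     for i in text:
--         if is_minus(i):
--             text_in_maj += chr(ord(i) - 32)
--         else:
--             text_in_maj += i
--     return text_in_maj
-- ===== SOURCE B (Python) =====
-- _TABLE = str.maketrans('abcdefghijklmnopqrstuvwxyz', 'ABCDEFGHIJKLMNOPQRSTUVWXYZ')
--
-- def lower_to_upper(text):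
--     return text.translate(_TABLE)
-- ===== Notes on version B (the rewrite author's own statement) =====
-- stated objective: faster
-- what changed: Replaces the explicit per-character loop with if/else ord-arithmetic and repeated string concatenation by a precomputed a-z translation table applied in a single str.translate call.
import Mathlib
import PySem

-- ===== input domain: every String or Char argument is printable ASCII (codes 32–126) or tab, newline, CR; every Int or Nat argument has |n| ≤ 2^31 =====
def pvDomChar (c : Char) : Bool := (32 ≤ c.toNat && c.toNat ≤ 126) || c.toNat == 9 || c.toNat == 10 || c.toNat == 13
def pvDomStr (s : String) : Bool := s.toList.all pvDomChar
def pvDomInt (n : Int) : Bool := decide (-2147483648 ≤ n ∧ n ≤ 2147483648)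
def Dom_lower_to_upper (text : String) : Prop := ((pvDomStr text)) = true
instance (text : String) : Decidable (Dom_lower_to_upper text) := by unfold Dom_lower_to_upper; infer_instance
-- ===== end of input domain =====

-- B replaces A's per-character if/else ord-arithmetic loop by a precomputed a→z translation
-- table applied with a single translate-style map (idiomatic; return value only).

-- ===== PORT A =====
def is_minus (c : Char) : Bool := decide (('a').toNat ≤ c.toNat ∧ c.toNat ≤ ('z').toNat)

def lower_to_upper (text : String) : String :=
  String.ofList
    (text.toList.foldl
      (fun text_in_maj i =>
        text_in_maj ++ (if is_minus i then [Char.ofNat (i.toNat - 32)] else [i]))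
      [])

-- ===== PORT B =====
-- str.maketrans('abcdefghijklmnopqrstuvwxyz', 'ABCDEFGHIJKLMNOPQRSTUVWXYZ')
def pvTable : PySem.Dict Char Char :=
  PySem.Dict.ofList
    (List.zip "abcdefghijklmnopqrstuvwxyz".toList "ABCDEFGHIJKLMNOPQRSTUVWXYZ".toList)

-- text.translate(_TABLE): each character looked up in the table, kept as-is if absent
def lower_to_upper_alt (text : String) : String :=
  String.ofList (text.toList.map (fun c => PySem.Dict.getD pvTable c c))

-- ===== PRECONDITION & SPEC =====
def Spec_lower_to_upper (text : String) (out : String) : Prop := out = lower_to_upper_alt text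
instance (text : String) (out : String) : Decidable (Spec_lower_to_upper text out) := by unfold Spec_lower_to_upper; infer_instance

-- ===== CLAIM (what is proved, stated in full; the proofs are below) =====
def Claim_equal_lower_to_upper : Prop := ∀ (text : String), Dom_lower_to_upper text → Spec_lower_to_upper text (lower_to_upper text)

-- ===== LEMMAS AND PROOFS =====

-- per character, A's branch computes exactly B's table lookup (for chars admitted by Dom)
lemma perChar (c : Char) (h : c.toNat ≤ 126) :
    (if is_minus c then [Char.ofNat (c.toNat - 32)] else [c])
      = [PySem.Dict.getD pvTable c c] := by
  obtain ⟨n, hn, rfl⟩ : ∃ n, n ≤ 126 ∧ Char.ofNat n = c :=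
    ⟨c.toNat, h, Char.ofNat_toNat c⟩
  interval_cases n <;> decide

lemma loop_eq (l : List Char) (acc : List Char) (h : ∀ c ∈ l, c.toNat ≤ 126) :
    l.foldl
      (fun text_in_maj i =>
        text_in_maj ++ (if is_minus i then [Char.ofNat (i.toNat - 32)] else [i])) acc
      = acc ++ l.map (fun c => PySem.Dict.getD pvTable c c) := by
  induction l generalizing acc with
  | nil => simp
  | cons c t ih =>
    have hc := perChar c (h c (List.mem_cons_self))
    simp only [List.foldl_cons, List.map_cons]
    rw [hc, ih _ (fun x hx => h x (List.mem_cons_of_mem _ hx)), List.append_assoc,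
      List.singleton_append]

-- ===== VERDICT (by name: the statement is the Claim_ definition above) =====
theorem lower_to_upper_spec : Claim_equal_lower_to_upper := by
  intro text hdom
  unfold Spec_lower_to_upper lower_to_upper lower_to_upper_alt
  have h : ∀ c ∈ text.toList, c.toNat ≤ 126 := by
    intro c hc
    have := List.all_eq_true.mp hdom c hc
    simp only [pvDomChar, Bool.or_eq_true, Bool.and_eq_true, decide_eq_true_eq,
      beq_iff_eq] at this
    omega
  rw [loop_eq _ _ h]
  simp
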